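-- pv_equiv track=rewrite | github.com/soohyun21815/scenario | S_1.py | li_from_tactics
-- ===== SOURCE A (Python) =====
-- L_DEFAULT = 3
--
-- I_DEFAULT = 4
--
-- I_BASE_BY_TACTIC = {
--     "exfiltration": 5,
--     "collection": 4,
--     "credential-access": 4,
--     "lateral-movement": 3,
--     "privilege-escalation": 3,
--     "defense-evasion": 3,
--     "execution": 3,
--     "initial-access": 3,
--     "command-and-control": 3,
--     "persistence": 3,
--     "discovery": 2,
--     "resource-development": 2,
--     "reconnaissance": 2,
-- }
--
-- L_BASE_BY_TACTIC = {
--     "exfiltration": 2,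
--     "collection": 2,
--     "credential-access": 2,
--     "defense-evasion": 2,
--     "privilege-escalation": 2,
--     "lateral-movement": 3,
--     "initial-access": 3,
--     "execution": 3,
--     "command-and-control": 3,
--     "persistence": 3,
--     "discovery": 4,
--     "resource-development": 4,
--     "reconnaissance": 4,
-- }
--
-- def li_from_tactics(tactics: list):
--     if not tactics:
--         return (L_DEFAULT, I_DEFAULT)
--     I_vals = [I_BASE_BY_TACTIC.get(t, I_DEFAULT) for t in tactics]
--     L_vals = [L_BASE_BY_TACTIC.get(t, L_DEFAULT) for t in tactics]
--     I = max(I_vals) if I_vals else I_DEFAULT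
--     L = min(L_vals) if L_vals else L_DEFAULT
--     I = max(1, min(5, int(I)))
--     L = max(1, min(5, int(L)))
--     return (L, I)
-- ===== SOURCE B (Python) =====
-- L_DEFAULT = 3
--
-- I_DEFAULT = 4
--
-- # Inverted index: for each impact score (descending) / likelihood score (ascending),
-- # the set of tactics that map to it.  The answer is the FIRST score whose bucket
-- # intersects the input (an unrecognised tactic counts at the default score), so no
-- # max/min over per-element lookups is ever computed.
-- I_BUCKETS = [
--     (5, frozenset({"exfiltration"})),
--     (4, frozenset({"collection", "credential-access"})),
--     (3, frozenset({"lateral-movement", "privilege-escalation", "defense-evasion",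
--                    "execution", "initial-access", "command-and-control", "persistence"})),
--     (2, frozenset({"discovery", "resource-development", "reconnaissance"})),
-- ]
--
-- L_BUCKETS = [
--     (2, frozenset({"exfiltration", "collection", "credential-access",
--                    "defense-evasion", "privilege-escalation"})),
--     (3, frozenset({"lateral-movement", "initial-access", "execution",
--                    "command-and-control", "persistence"})),
--     (4, frozenset({"discovery", "resource-development", "reconnaissance"})),
-- ]
--
-- KNOWN_TACTICS = frozenset().union(*(b for _, b in I_BUCKETS))
--
--
-- def li_from_tactics(tactics: list):
--     if not tactics:
--         return (L_DEFAULT, I_DEFAULT)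
--     ts = set(tactics)
--     unknown = not ts <= KNOWN_TACTICS
--     I = next(s for s, bucket in I_BUCKETS if (ts & bucket) or (s == I_DEFAULT and unknown))
--     L = next(s for s, bucket in L_BUCKETS if (ts & bucket) or (s == L_DEFAULT and unknown))
--     return (L, I)
-- ===== Notes on version B (the rewrite author's own statement) =====
-- stated objective: alternative
-- what changed: Replaces the per-tactic dict lookups aggregated with max()/min() by an inverted index: score buckets (score -> set of tactics) scanned in priority order, returning the first score whose bucket intersects the deduplicated input set (unknown tactics count at the default score).
import Mathlib
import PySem

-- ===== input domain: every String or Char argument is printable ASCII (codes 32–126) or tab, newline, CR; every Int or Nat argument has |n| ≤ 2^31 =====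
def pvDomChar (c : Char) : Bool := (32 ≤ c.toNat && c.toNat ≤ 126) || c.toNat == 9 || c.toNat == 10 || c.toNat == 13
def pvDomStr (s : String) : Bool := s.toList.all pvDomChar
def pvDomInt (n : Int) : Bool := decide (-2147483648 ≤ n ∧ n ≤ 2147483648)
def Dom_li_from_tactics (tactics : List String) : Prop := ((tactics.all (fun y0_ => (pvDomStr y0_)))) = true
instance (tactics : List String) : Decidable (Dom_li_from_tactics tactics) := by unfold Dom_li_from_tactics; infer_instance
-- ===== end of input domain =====

-- B replaces A's per-tactic dict lookups aggregated with max()/min() by an inverted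
-- index (score buckets in priority order, first bucket intersecting the input set wins);
-- objective: alternative algorithm, same cost.

-- ===== PORT A =====
def iBaseByTactic : PySem.Dict String Int := PySem.Dict.ofList
  [("exfiltration", 5), ("collection", 4), ("credential-access", 4),
   ("lateral-movement", 3), ("privilege-escalation", 3), ("defense-evasion", 3),
   ("execution", 3), ("initial-access", 3), ("command-and-control", 3),
   ("persistence", 3), ("discovery", 2), ("resource-development", 2),
   ("reconnaissance", 2)]

def lBaseByTactic : PySem.Dict String Int := PySem.Dict.ofList
  [("exfiltration", 2), ("collection", 2), ("credential-access", 2),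
   ("defense-evasion", 2), ("privilege-escalation", 2), ("lateral-movement", 3),
   ("initial-access", 3), ("execution", 3), ("command-and-control", 3),
   ("persistence", 3), ("discovery", 4), ("resource-development", 4),
   ("reconnaissance", 4)]

def li_from_tactics (tactics : List String) : Int × Int :=
  if tactics = [] then (3, 4)
  else
    let I_vals := tactics.map (fun t => iBaseByTactic.getD t 4)
    let L_vals := tactics.map (fun t => lBaseByTactic.getD t 3)
    let I : Int := (PySem.List.max? I_vals (fun x => x)).getD 4
    let L : Int := (PySem.List.min? L_vals (fun x => x)).getD 3
    let I := max 1 (min 5 I)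
    let L := max 1 (min 5 L)
    (L, I)

-- ===== PORT B =====
-- Inverted index: for each impact score (descending) / likelihood score (ascending),
-- the set of tactics mapping to it (Python frozensets; a PySem.Set is a distinct list).
def bI5 : List String := ["exfiltration"]
def bI4 : List String := ["collection", "credential-access"]
def bI3 : List String := ["lateral-movement", "privilege-escalation", "defense-evasion",
                          "execution", "initial-access", "command-and-control", "persistence"]
def bI2 : List String := ["discovery", "resource-development", "reconnaissance"]
def bL2 : List String := ["exfiltration", "collection", "credential-access",
                          "defense-evasion", "privilege-escalation"]
def bL3 : List String := ["lateral-movement", "initial-access", "execution",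
                          "command-and-control", "persistence"]
def bL4 : List String := ["discovery", "resource-development", "reconnaissance"]

def iBuckets : List (Int × List String) := [(5, bI5), (4, bI4), (3, bI3), (2, bI2)]

def lBuckets : List (Int × List String) := [(2, bL2), (3, bL3), (4, bL4)]

-- KNOWN_TACTICS = frozenset().union(*(b for _, b in I_BUCKETS))
def knownTactics : List String :=
  iBuckets.foldl (fun s sb => PySem.Set.update s sb.2) PySem.Set.empty

-- next(...) over the bucket list is List.find?; it always hits a bucket (proved in the
-- lemmas below), so the .getD default stands in for the unreachable no-match case.
def li_from_tactics_alt (tactics : List String) : Int × Int :=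
  match tactics with
  | [] => (3, 4)
  | _ :: _ =>
    let ts : PySem.Set String := PySem.Set.ofList tactics
    let unknown : Bool := !(PySem.Set.issubset ts knownTactics)
    let I : Int := ((iBuckets.find? (fun sb =>
        !(PySem.Set.inter ts sb.2).isEmpty || (sb.1 == 4 && unknown))).map Prod.fst).getD 4
    let L : Int := ((lBuckets.find? (fun sb =>
        !(PySem.Set.inter ts sb.2).isEmpty || (sb.1 == 3 && unknown))).map Prod.fst).getD 3
    (L, I)

-- ===== PRECONDITION & SPEC =====
def Spec_li_from_tactics (tactics : List String) (out : Int × Int) : Prop := out = li_from_tactics_alt tactics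
instance (tactics : List String) (out : Int × Int) : Decidable (Spec_li_from_tactics tactics out) := by unfold Spec_li_from_tactics; infer_instance

-- ===== CLAIM (what is proved, stated in full; the proofs are below) =====
def Claim_equal_li_from_tactics : Prop := ∀ (tactics : List String), Dom_li_from_tactics tactics → Spec_li_from_tactics tactics (li_from_tactics tactics)

-- ===== LEMMAS AND PROOFS =====

theorem known_eq : knownTactics =
    ["exfiltration", "collection", "credential-access", "lateral-movement",
     "privilege-escalation", "defense-evasion", "execution", "initial-access",
     "command-and-control", "persistence", "discovery", "resource-development",
     "reconnaissance"] := by rfl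

theorem fI_known (t : String) (h : t ∈ knownTactics) :
    iBaseByTactic.getD t 4 =
      if t ∈ bI5 then 5
      else if t ∈ bI4 then 4
      else if t ∈ bI3 then 3 else 2 := by
  rw [known_eq] at h
  simp only [List.mem_cons, List.not_mem_nil, or_false] at h
  rcases h with rfl|rfl|rfl|rfl|rfl|rfl|rfl|rfl|rfl|rfl|rfl|rfl|rfl <;> decide

theorem fI_unknown (t : String) (h : ¬ t ∈ knownTactics) : iBaseByTactic.getD t 4 = 4 := by
  rw [known_eq] at h
  simp only [List.mem_cons, List.not_mem_nil, or_false, not_or] at h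
  obtain ⟨h1,h2,h3,h4,h5,h6,h7,h8,h9,h10,h11,h12,h13⟩ := h
  simp [iBaseByTactic, PySem.Dict.ofList, PySem.Dict.update, List.foldl, PySem.Dict.getD_insert,
    h1,h2,h3,h4,h5,h6,h7,h8,h9,h10,h11,h12,h13]

theorem fL_known (t : String) (h : t ∈ knownTactics) :
    lBaseByTactic.getD t 3 =
      if t ∈ bL2 then 2
      else if t ∈ bL3 then 3 else 4 := by
  rw [known_eq] at h
  simp only [List.mem_cons, List.not_mem_nil, or_false] at h
  rcases h with rfl|rfl|rfl|rfl|rfl|rfl|rfl|rfl|rfl|rfl|rfl|rfl|rfl <;> decide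

theorem fL_unknown (t : String) (h : ¬ t ∈ knownTactics) : lBaseByTactic.getD t 3 = 3 := by
  rw [known_eq] at h
  simp only [List.mem_cons, List.not_mem_nil, or_false, not_or] at h
  obtain ⟨h1,h2,h3,h4,h5,h6,h7,h8,h9,h10,h11,h12,h13⟩ := h
  simp [lBaseByTactic, PySem.Dict.ofList, PySem.Dict.update, List.foldl, PySem.Dict.getD_insert,
    h1,h2,h3,h4,h5,h6,h7,h8,h9,h10,h11,h12,h13]


theorem known_split : knownTactics = bI5 ++ bI4 ++ bI3 ++ bI2 := by rfl

theorem mem_known_iff (t : String) :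
    t ∈ knownTactics ↔ (t ∈ bI5 ∨ t ∈ bI4 ∨ t ∈ bI3 ∨ t ∈ bI2) := by
  rw [known_split]
  simp [List.mem_append, or_assoc]

theorem mem_known_iff_L (t : String) :
    t ∈ knownTactics ↔ (t ∈ bL2 ∨ t ∈ bL3 ∨ t ∈ bL4) := by
  have hp : knownTactics.Perm (bL2 ++ bL3 ++ bL4) := by decide
  rw [List.Perm.mem_iff hp]
  simp [List.mem_append, or_assoc]

-- pointwise values on the buckets
theorem fI_of_b5 (t : String) (h : t ∈ bI5) : iBaseByTactic.getD t 4 = 5 := by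
  simp only [bI5, List.mem_cons, List.not_mem_nil, or_false] at h; subst h; decide

theorem fI_of_b4 (t : String) (h : t ∈ bI4) : iBaseByTactic.getD t 4 = 4 := by
  simp only [bI4, List.mem_cons, List.not_mem_nil, or_false] at h
  rcases h with rfl | rfl <;> decide

theorem fI_of_b3 (t : String) (h : t ∈ bI3) : iBaseByTactic.getD t 4 = 3 := by
  simp only [bI3, List.mem_cons, List.not_mem_nil, or_false] at h
  rcases h with rfl | rfl | rfl | rfl | rfl | rfl | rfl <;> decide

theorem fL_of_b2 (t : String) (h : t ∈ bL2) : lBaseByTactic.getD t 3 = 2 := by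
  simp only [bL2, List.mem_cons, List.not_mem_nil, or_false] at h
  rcases h with rfl | rfl | rfl | rfl | rfl <;> decide

theorem fL_of_b3 (t : String) (h : t ∈ bL3) : lBaseByTactic.getD t 3 = 3 := by
  simp only [bL3, List.mem_cons, List.not_mem_nil, or_false] at h
  rcases h with rfl | rfl | rfl | rfl | rfl <;> decide

-- bounds
theorem fI_le5 (t : String) : iBaseByTactic.getD t 4 ≤ 5 := by
  by_cases hk : t ∈ knownTactics
  · rw [fI_known t hk]; split_ifs <;> norm_num
  · rw [fI_unknown t hk]; norm_num

theorem fI_le4 (t : String) (h5 : t ∉ bI5) : iBaseByTactic.getD t 4 ≤ 4 := by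
  by_cases hk : t ∈ knownTactics
  · rw [fI_known t hk, if_neg h5]; split_ifs <;> norm_num
  · rw [fI_unknown t hk]

theorem fI_le3 (t : String) (h5 : t ∉ bI5) (h4 : t ∉ bI4) (hk : t ∈ knownTactics) :
    iBaseByTactic.getD t 4 ≤ 3 := by
  rw [fI_known t hk, if_neg h5, if_neg h4]; split_ifs <;> norm_num

theorem fI_eq2 (t : String) (h5 : t ∉ bI5) (h4 : t ∉ bI4) (h3 : t ∉ bI3)
    (hk : t ∈ knownTactics) : iBaseByTactic.getD t 4 = 2 := by
  rw [fI_known t hk, if_neg h5, if_neg h4, if_neg h3]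

theorem fL_ge2 (t : String) : 2 ≤ lBaseByTactic.getD t 3 := by
  by_cases hk : t ∈ knownTactics
  · rw [fL_known t hk]; split_ifs <;> norm_num
  · rw [fL_unknown t hk]; norm_num

theorem fL_ge3 (t : String) (h2 : t ∉ bL2) : 3 ≤ lBaseByTactic.getD t 3 := by
  by_cases hk : t ∈ knownTactics
  · rw [fL_known t hk, if_neg h2]; split_ifs <;> norm_num
  · rw [fL_unknown t hk]

theorem fL_eq4 (t : String) (h2 : t ∉ bL2) (h3 : t ∉ bL3) (hk : t ∈ knownTactics) :
    lBaseByTactic.getD t 3 = 4 := by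
  rw [fL_known t hk, if_neg h2, if_neg h3]

-- boolean bridges
theorem inter_empty_iff (l b : List String) :
    ((PySem.Set.inter (PySem.Set.ofList l) b).isEmpty = true) ↔ ∀ t ∈ l, t ∉ b := by
  rw [List.isEmpty_iff, List.eq_nil_iff_forall_not_mem]
  constructor
  · intro h t htl htb
    exact h t (by rw [PySem.Set.mem_inter]; exact ⟨(PySem.Set.mem_ofList _ _).2 htl, htb⟩)
  · intro h x hx
    rw [PySem.Set.mem_inter, PySem.Set.mem_ofList] at hx
    exact h x hx.1 hx.2

theorem inter_nonempty_iff (l b : List String) :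
    ((PySem.Set.inter (PySem.Set.ofList l) b).isEmpty = false) ↔ ∃ t ∈ l, t ∈ b := by
  rw [Bool.eq_false_iff, Ne, inter_empty_iff]
  push_neg
  simp

theorem issubset_false_iff (l b : List String) :
    ((PySem.Set.issubset (PySem.Set.ofList l) b) = false) ↔ ∃ t ∈ l, t ∉ b := by
  rw [Bool.eq_false_iff, Ne, PySem.Set.issubset_iff]
  push_neg
  simp [PySem.Set.mem_ofList]

-- the I component: A's clamped max of lookups = B's first hit over iBuckets
theorem I_side (t0 : String) (rest : List String) :
    max 1 (min 5 ((PySem.List.max? ((t0 :: rest).map (fun t => iBaseByTactic.getD t 4)) (fun x => x)).getD 4))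
      = ((iBuckets.find? (fun sb =>
            !(PySem.Set.inter (PySem.Set.ofList (t0 :: rest)) sb.2).isEmpty
              || (sb.1 == 4 && !(PySem.Set.issubset (PySem.Set.ofList (t0 :: rest)) knownTactics)))).map Prod.fst).getD 4 := by
  obtain ⟨M, hM⟩ : ∃ M, PySem.List.max? ((t0 :: rest).map (fun t => iBaseByTactic.getD t 4)) (fun x => x) = some M := by
    cases h : PySem.List.max? ((t0 :: rest).map (fun t => iBaseByTactic.getD t 4)) (fun x => x) with
    | none => rw [PySem.List.max?_eq_none_iff] at h; simp at h
    | some M => exact ⟨M, rfl⟩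
  have hmem := PySem.List.max?_mem hM
  rw [List.mem_map] at hmem
  obtain ⟨tM, htMl, htMv⟩ := hmem
  have hub : ∀ t ∈ (t0 :: rest), iBaseByTactic.getD t 4 ≤ M := by
    intro t ht
    exact PySem.List.max?_isMax hM _ (List.mem_map_of_mem ht)
  rw [hM, Option.getD_some]
  by_cases c5 : ∃ t ∈ (t0 :: rest), t ∈ bI5
  · have hb5 : (PySem.Set.inter (PySem.Set.ofList (t0 :: rest)) bI5).isEmpty = false :=
      (inter_nonempty_iff _ _).2 c5
    obtain ⟨t, htl, htb⟩ := c5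
    have h1 : (5:Int) ≤ M := fI_of_b5 t htb ▸ hub t htl
    have h2 : M ≤ 5 := htMv ▸ fI_le5 tM
    simp [iBuckets, List.find?, hb5]
    omega
  · have hb5 : (PySem.Set.inter (PySem.Set.ofList (t0 :: rest)) bI5).isEmpty = true := by
      rw [inter_empty_iff]; intro t htl htb; exact c5 ⟨t, htl, htb⟩
    have hn5 : ∀ t ∈ (t0 :: rest), t ∉ bI5 := fun t htl htb => c5 ⟨t, htl, htb⟩
    by_cases c4 : (∃ t ∈ (t0 :: rest), t ∈ bI4) ∨ (∃ t ∈ (t0 :: rest), t ∉ knownTactics)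
    · have h2 : M ≤ 4 := htMv ▸ fI_le4 tM (hn5 tM htMl)
      rcases c4 with ⟨t, htl, htb⟩ | ⟨t, htl, htb⟩
      · have h1 : (4:Int) ≤ M := fI_of_b4 t htb ▸ hub t htl
        have hb4 : (PySem.Set.inter (PySem.Set.ofList (t0 :: rest)) bI4).isEmpty = false :=
          (inter_nonempty_iff _ _).2 ⟨t, htl, htb⟩
        simp [iBuckets, List.find?, hb5, hb4]
        omega
      · have h1 : (4:Int) ≤ M := fI_unknown t htb ▸ hub t htl
        have hsub : (PySem.Set.issubset (PySem.Set.ofList (t0 :: rest)) knownTactics) = false :=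
          (issubset_false_iff _ _).2 ⟨t, htl, htb⟩
        simp [iBuckets, List.find?, hb5, hsub]
        omega
    · push_neg at c4
      obtain ⟨nc4, nunk⟩ := c4
      have hall : ∀ t ∈ (t0 :: rest), t ∈ knownTactics := nunk
      have hn4 : ∀ t ∈ (t0 :: rest), t ∉ bI4 := nc4
      have hb4 : (PySem.Set.inter (PySem.Set.ofList (t0 :: rest)) bI4).isEmpty = true := by
        rw [inter_empty_iff]; exact hn4
      have hsub : (PySem.Set.issubset (PySem.Set.ofList (t0 :: rest)) knownTactics) = true := by
        rw [PySem.Set.issubset_iff]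
        intro x hx
        exact hall x ((PySem.Set.mem_ofList _ _).1 hx)
      by_cases c3 : ∃ t ∈ (t0 :: rest), t ∈ bI3
      · have hb3 : (PySem.Set.inter (PySem.Set.ofList (t0 :: rest)) bI3).isEmpty = false :=
          (inter_nonempty_iff _ _).2 c3
        obtain ⟨t, htl, htb⟩ := c3
        have h1 : (3:Int) ≤ M := fI_of_b3 t htb ▸ hub t htl
        have h2 : M ≤ 3 := htMv ▸ fI_le3 tM (hn5 tM htMl) (hn4 tM htMl) (hall tM htMl)
        simp [iBuckets, List.find?, hb5, hb4, hsub, hb3]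
        omega
      · have hn3 : ∀ t ∈ (t0 :: rest), t ∉ bI3 := fun t htl htb => c3 ⟨t, htl, htb⟩
        have hb2 : (PySem.Set.inter (PySem.Set.ofList (t0 :: rest)) bI2).isEmpty = false := by
          rw [inter_nonempty_iff]
          refine ⟨t0, List.mem_cons_self, ?_⟩
          have := (mem_known_iff t0).1 (hall t0 List.mem_cons_self)
          rcases this with h | h | h | h
          · exact absurd h (hn5 t0 List.mem_cons_self)
          · exact absurd h (hn4 t0 List.mem_cons_self)
          · exact absurd h (hn3 t0 List.mem_cons_self)
          · exact h
        have hM2 : M = 2 :=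
          htMv ▸ fI_eq2 tM (hn5 tM htMl) (hn4 tM htMl) (hn3 tM htMl) (hall tM htMl)
        simp [iBuckets, List.find?, hb5, hb4, hsub, hb2, (inter_empty_iff _ _).2 hn3]
        omega

-- the L component: A's clamped min of lookups = B's first hit over lBuckets
theorem L_side (t0 : String) (rest : List String) :
    max 1 (min 5 ((PySem.List.min? ((t0 :: rest).map (fun t => lBaseByTactic.getD t 3)) (fun x => x)).getD 3))
      = ((lBuckets.find? (fun sb =>
            !(PySem.Set.inter (PySem.Set.ofList (t0 :: rest)) sb.2).isEmpty
              || (sb.1 == 3 && !(PySem.Set.issubset (PySem.Set.ofList (t0 :: rest)) knownTactics)))).map Prod.fst).getD 3 := by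
  obtain ⟨M, hM⟩ : ∃ M, PySem.List.min? ((t0 :: rest).map (fun t => lBaseByTactic.getD t 3)) (fun x => x) = some M := by
    cases h : PySem.List.min? ((t0 :: rest).map (fun t => lBaseByTactic.getD t 3)) (fun x => x) with
    | none => rw [PySem.List.min?_eq_none_iff] at h; simp at h
    | some M => exact ⟨M, rfl⟩
  have hmem := PySem.List.min?_mem hM
  rw [List.mem_map] at hmem
  obtain ⟨tM, htMl, htMv⟩ := hmem
  have hlb : ∀ t ∈ (t0 :: rest), M ≤ lBaseByTactic.getD t 3 := by
    intro t ht
    exact PySem.List.min?_isMin hM _ (List.mem_map_of_mem ht)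
  rw [hM, Option.getD_some]
  by_cases c2 : ∃ t ∈ (t0 :: rest), t ∈ bL2
  · have hb2 : (PySem.Set.inter (PySem.Set.ofList (t0 :: rest)) bL2).isEmpty = false :=
      (inter_nonempty_iff _ _).2 c2
    obtain ⟨t, htl, htb⟩ := c2
    have h1 : M ≤ 2 := fL_of_b2 t htb ▸ hlb t htl
    have h2 : (2:Int) ≤ M := htMv ▸ fL_ge2 tM
    simp [lBuckets, List.find?, hb2]
    omega
  · have hb2 : (PySem.Set.inter (PySem.Set.ofList (t0 :: rest)) bL2).isEmpty = true := by
      rw [inter_empty_iff]; intro t htl htb; exact c2 ⟨t, htl, htb⟩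
    have hn2 : ∀ t ∈ (t0 :: rest), t ∉ bL2 := fun t htl htb => c2 ⟨t, htl, htb⟩
    by_cases c3 : (∃ t ∈ (t0 :: rest), t ∈ bL3) ∨ (∃ t ∈ (t0 :: rest), t ∉ knownTactics)
    · have h2 : (3:Int) ≤ M := htMv ▸ fL_ge3 tM (hn2 tM htMl)
      rcases c3 with ⟨t, htl, htb⟩ | ⟨t, htl, htb⟩
      · have h1 : M ≤ 3 := fL_of_b3 t htb ▸ hlb t htl
        have hb3 : (PySem.Set.inter (PySem.Set.ofList (t0 :: rest)) bL3).isEmpty = false :=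
          (inter_nonempty_iff _ _).2 ⟨t, htl, htb⟩
        simp [lBuckets, List.find?, hb2, hb3]
        omega
      · have h1 : M ≤ 3 := fL_unknown t htb ▸ hlb t htl
        have hsub : (PySem.Set.issubset (PySem.Set.ofList (t0 :: rest)) knownTactics) = false :=
          (issubset_false_iff _ _).2 ⟨t, htl, htb⟩
        simp [lBuckets, List.find?, hb2, hsub]
        omega
    · push_neg at c3
      obtain ⟨nc3, nunk⟩ := c3
      have hall : ∀ t ∈ (t0 :: rest), t ∈ knownTactics := nunk
      have hn3 : ∀ t ∈ (t0 :: rest), t ∉ bL3 := nc3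
      have hb3 : (PySem.Set.inter (PySem.Set.ofList (t0 :: rest)) bL3).isEmpty = true := by
        rw [inter_empty_iff]; exact hn3
      have hsub : (PySem.Set.issubset (PySem.Set.ofList (t0 :: rest)) knownTactics) = true := by
        rw [PySem.Set.issubset_iff]
        intro x hx
        exact hall x ((PySem.Set.mem_ofList _ _).1 hx)
      have hb4 : (PySem.Set.inter (PySem.Set.ofList (t0 :: rest)) bL4).isEmpty = false := by
        rw [inter_nonempty_iff]
        refine ⟨t0, List.mem_cons_self, ?_⟩
        have := (mem_known_iff_L t0).1 (hall t0 List.mem_cons_self)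
        rcases this with h | h | h
        · exact absurd h (hn2 t0 List.mem_cons_self)
        · exact absurd h (hn3 t0 List.mem_cons_self)
        · exact h
      have hM4 : M = 4 :=
        htMv ▸ fL_eq4 tM (hn2 tM htMl) (hn3 tM htMl) (hall tM htMl)
      simp [lBuckets, List.find?, hb2, hb3, hsub, hb4]
      omega

-- ===== VERDICT (by name: the statement is the Claim_ definition above) =====
theorem li_from_tactics_spec : Claim_equal_li_from_tactics := by
  intro tactics _
  unfold Spec_li_from_tactics
  cases tactics with
  | nil => rfl
  | cons t0 rest =>
    show li_from_tactics (t0 :: rest) = li_from_tactics_alt (t0 :: rest)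
    simp only [li_from_tactics, li_from_tactics_alt, reduceCtorEq, if_false]
    exact Prod.ext (L_side t0 rest) (I_side t0 rest)
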